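-- pv_equiv track=rewrite | github.com/stuartpople/customs-invoice-tool | excel_export.py | _summarize_requirement
-- ===== SOURCE A (Python) =====
-- def _summarize_requirement(requirement: str) -> str:
--     """Intelligently shorten requirement text while keeping essential info"""
--     if not requirement or len(requirement) <= 50:
--         return requirement
--
--     import re
--
--     # Remove all parenthetical content containing "Regulation"
--     # Strategy: find and remove the outermost parentheses that contain "regulation"
--     shortened = requirement
--     max_iterations = 10  # Prevent infinite loops
--     iteration = 0
--
--     while '(' in shortened and iteration < max_iterations:
--         iteration += 1
--         # Find opening parenthesis
--         start = shortened.find('(')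
--         if start == -1:
--             break
--
--         # Find matching closing parenthesis
--         depth = 0
--         end = -1
--         for i in range(start, len(shortened)):
--             if shortened[i] == '(':
--                 depth += 1
--             elif shortened[i] == ')':
--                 depth -= 1
--                 if depth == 0:
--                     end = i
--                     break
--
--         if end == -1:
--             break
--
--         # Check if this section contains "regulation"
--         section = shortened[start:end+1]
--         if 'regulation' in section.lower():
--             # Remove this parenthetical section
--             shortened = shortened[:start] + shortened[end+1:]
--         else:
--             # No regulation in this section, no more to process
--             break
--
--     # Common phrase replacements
--     replacements = {
--         'Export licence: Dual use export authorisation': 'Dual Use Export Licence',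
--         'Export licence: ': '',
--         'Import licence: ': '',
--         'Certificate of origin': 'Origin Certificate',
--         'Phytosanitary certificate': 'Phytosanitary Cert',
--         'Veterinary certificate': 'Veterinary Cert',
--         'Health certificate': 'Health Cert',
--         'Conformity certificate': 'Conformity Cert',
--         'Commercial invoice': 'Comm. Invoice',
--         'Packing list': 'Packing List',
--         ' required': '',
--         ' is required': '',
--     }
--
--     for old, new in replacements.items():
--         shortened = shortened.replace(old, new)
--
--     # Trim whitespace and limit length
--     shortened = shortened.strip()
--     if len(shortened) > 60:
--         shortened = shortened[:57] + '...'
--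
--     return shortened
-- ===== SOURCE B (Python) =====
-- def _summarize_requirement(requirement: str) -> str:
--     """Single left-to-right pass with a depth counter instead of repeated find+rebuild."""
--     if not requirement or len(requirement) <= 50:
--         return requirement
--
--     out = []
--     i = 0
--     n = len(requirement)
--     budget = 10  # same cap as the original's max_iterations
--     while i < n:
--         c = requirement[i]
--         if c == '(' and budget > 0:
--             # scan to the matching ')'
--             depth = 0
--             j = i
--             end = -1
--             while j < n:
--                 if requirement[j] == '(':
--                     depth += 1
--                 elif requirement[j] == ')':
--                     depth -= 1
--                     if depth == 0:
--                         end = j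
--                         break
--                 j += 1
--             if end == -1:
--                 # unbalanced: keep the rest unchanged
--                 out.append(requirement[i:])
--                 break
--             if 'regulation' in requirement[i:end + 1].lower():
--                 budget -= 1
--                 i = end + 1
--                 continue
--             # first non-regulation parenthetical stops all processing
--             out.append(requirement[i:])
--             break
--         out.append(c)
--         i += 1
--     shortened = ''.join(out)
--
--     replacements = {
--         'Export licence: Dual use export authorisation': 'Dual Use Export Licence',
--         'Export licence: ': '',
--         'Import licence: ': '',
--         'Certificate of origin': 'Origin Certificate',
--         'Phytosanitary certificate': 'Phytosanitary Cert',
--         'Veterinary certificate': 'Veterinary Cert',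
--         'Health certificate': 'Health Cert',
--         'Conformity certificate': 'Conformity Cert',
--         'Commercial invoice': 'Comm. Invoice',
--         'Packing list': 'Packing List',
--         ' required': '',
--         ' is required': '',
--     }
--     for old, new in replacements.items():
--         shortened = shortened.replace(old, new)
--
--     shortened = shortened.strip()
--     if len(shortened) > 60:
--         shortened = shortened[:57] + '...'
--     return shortened
-- ===== Notes on version B (the rewrite author's own statement) =====
-- stated objective: alternative
-- what changed: Replaced A's repeated find-the-first-opening-parenthesis-then-rebuild-the-whole-string while-loop by a single left-to-right pass with a depth counter and a removal budget of 10, keeping the guard, replacement table, strip and truncation unchanged.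
import Mathlib
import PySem

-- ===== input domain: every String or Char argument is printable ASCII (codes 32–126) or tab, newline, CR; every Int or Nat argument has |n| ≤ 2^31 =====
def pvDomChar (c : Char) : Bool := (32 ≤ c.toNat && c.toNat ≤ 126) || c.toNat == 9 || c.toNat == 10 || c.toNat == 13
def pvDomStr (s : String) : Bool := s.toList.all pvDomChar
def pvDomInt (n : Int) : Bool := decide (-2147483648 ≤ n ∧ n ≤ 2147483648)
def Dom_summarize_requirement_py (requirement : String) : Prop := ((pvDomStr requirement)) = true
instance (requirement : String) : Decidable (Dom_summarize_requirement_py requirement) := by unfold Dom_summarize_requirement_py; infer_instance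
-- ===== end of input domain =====

-- B replaces A's repeated find-and-rebuild while-loop by a single left-to-right pass with a
-- depth counter and a removal budget (objective: alternative one-pass structure, same exact output).

-- ===== PORT A =====

-- the `replacements` dict of the Python (same literal table in both sources)
def pvReplacements : List (List Char × List Char) :=
  [("Export licence: Dual use export authorisation".toList, "Dual Use Export Licence".toList),
   ("Export licence: ".toList, "".toList),
   ("Import licence: ".toList, "".toList),
   ("Certificate of origin".toList, "Origin Certificate".toList),
   ("Phytosanitary certificate".toList, "Phytosanitary Cert".toList),
   ("Veterinary certificate".toList, "Veterinary Cert".toList),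
   ("Health certificate".toList, "Health Cert".toList),
   ("Conformity certificate".toList, "Conformity Cert".toList),
   ("Commercial invoice".toList, "Comm. Invoice".toList),
   ("Packing list".toList, "Packing List".toList),
   (" required".toList, "".toList),
   (" is required".toList, "".toList)]

-- A's inner `for i in range(start, len(shortened))` matching-paren scan: `u` is the suffix
-- shortened[start:], `i` the absolute index of its head, returns `end` (or -1, exact).
def pvMatchA : List Char → Int → Int → Int
  | [], _, _ => -1
  | c :: rest, i, depth =>
    if c = '(' then pvMatchA rest (i + 1) (depth + 1)
    else if c = ')' then
      (if depth - 1 = 0 then i else pvMatchA rest (i + 1) (depth - 1))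
    else pvMatchA rest (i + 1) depth

-- A's `while '(' in shortened and iteration < max_iterations` loop;
-- fuel = max_iterations - iteration, starts at 10.
def pvLoopA : Nat → List Char → List Char
  | 0, s => s
  | f + 1, s =>
    if PySem.Chars.isIn ['('] s then
      let start := PySem.Chars.find s ['(']
      if start = -1 then s
      else
        let e := pvMatchA (List.drop start.toNat s) start 0
        if e = -1 then s
        else
          let sec := PySem.List.slice s (some start) (some (e + 1))
          if PySem.Chars.isIn "regulation".toList (PySem.Chars.lower sec) then
            pvLoopA f (PySem.List.slice s none (some start) ++ PySem.List.slice s (some (e + 1)) none)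
          else s
    else s

def summarize_requirement_py (requirement : String) : String :=
  if requirement = "" ∨ PySem.Str.len requirement ≤ 50 then requirement
  else
    let s1 := pvLoopA 10 requirement.toList
    let s2 := pvReplacements.foldl (fun acc p => PySem.Chars.replace acc p.1 p.2) s1
    let s3 := PySem.Chars.strip s2
    String.ofList (if 60 < s3.length then PySem.List.slice s3 none (some 57) ++ "...".toList else s3)

-- ===== PORT B =====

-- B's inner `while j < n` depth scan, relative to the current position: the offset of the
-- matching ')' from the opening '(', or none if unbalanced.
def pvMatchB : List Char → Int → Option Nat
  | [], _ => none
  | c :: rest, depth =>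
    if c = '(' then (pvMatchB rest (depth + 1)).map (· + 1)
    else if c = ')' then
      (if depth - 1 = 0 then some 0 else (pvMatchB rest (depth - 1)).map (· + 1))
    else (pvMatchB rest depth).map (· + 1)

-- B's single `while i < n` pass: copy characters; at an opening parenthesis with budget left, scan to the
-- matching ')', drop the span if it mentions "regulation", otherwise stop.
def pvPassB : Nat → List Char → List Char
  | _, [] => []
  | budget, c :: rest =>
    if c = '(' ∧ 0 < budget then
      match pvMatchB (c :: rest) 0 with
      | none => c :: rest
      | some e =>
        if PySem.Chars.isIn "regulation".toList (PySem.Chars.lower ((c :: rest).take (e + 1))) then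
          pvPassB (budget - 1) ((c :: rest).drop (e + 1))
        else c :: rest
    else c :: pvPassB budget rest
  termination_by _ s => s.length
  decreasing_by
    · simp only [List.length_drop, List.length_cons]; omega
    · simp

def summarize_requirement_py_alt (requirement : String) : String :=
  if requirement = "" ∨ PySem.Str.len requirement ≤ 50 then requirement
  else
    let s1 := pvPassB 10 requirement.toList
    let s2 := pvReplacements.foldl (fun acc p => PySem.Chars.replace acc p.1 p.2) s1
    let s3 := PySem.Chars.strip s2
    String.ofList (if 60 < s3.length then PySem.List.slice s3 none (some 57) ++ "...".toList else s3)

-- ===== PRECONDITION & SPEC =====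
def Spec_summarize_requirement_py (requirement : String) (out : String) : Prop := out = summarize_requirement_py_alt requirement
instance (requirement : String) (out : String) : Decidable (Spec_summarize_requirement_py requirement out) := by unfold Spec_summarize_requirement_py; infer_instance

-- ===== CLAIM (what is proved, stated in full; the proofs are below) =====
def Claim_equal_summarize_requirement_py : Prop := ∀ (requirement : String), Dom_summarize_requirement_py requirement → Spec_summarize_requirement_py requirement (summarize_requirement_py requirement)

-- ===== LEMMAS AND PROOFS =====

-- B's pass with exhausted budget copies the string unchanged
theorem pvPassB_zero (s : List Char) : pvPassB 0 s = s := by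
  induction s with
  | nil => simp [pvPassB]
  | cons c rest ih => simp [pvPassB, ih]

-- B's pass distributes over a prefix free of opening parentheses
theorem pvPassB_append_free (p : List Char) (hp : '(' ∉ p) (b : Nat) (rest : List Char) :
    pvPassB b (p ++ rest) = p ++ pvPassB b rest := by
  induction p with
  | nil => simp
  | cons c q ih =>
    have hc : c ≠ '(' := fun h => hp (h ▸ List.mem_cons_self ..)
    have hq : '(' ∉ q := fun h => hp (List.mem_cons_of_mem _ h)
    cases rest with
    | nil => simp only [List.append_nil] at *; simpa [pvPassB, hc] using ih hq
    | cons d t => simp only [List.cons_append, pvPassB, hc, false_and, if_false, ih hq]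

theorem pvPassB_nil (b : Nat) : pvPassB b [] = [] := by simp [pvPassB]

theorem pvPassB_no_paren (s : List Char) (hs : '(' ∉ s) (b : Nat) : pvPassB b s = s := by
  have h := pvPassB_append_free s hs b []
  simp only [pvPassB_nil, List.append_nil] at h
  exact h

-- the two matching-paren scans agree (A's absolute index vs B's relative offset)
theorem pvMatch_agree (u : List Char) (i d : Int) :
    pvMatchA u i d = (pvMatchB u d).elim (-1) (fun e => i + (e : Int)) := by
  induction u generalizing i d with
  | nil => simp [pvMatchA, pvMatchB]
  | cons c rest ih =>
    by_cases hc : c = '('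
    · simp only [pvMatchA, pvMatchB, hc, if_true, ih]
      cases pvMatchB rest (d + 1) <;> simp <;> omega
    · by_cases hc' : c = ')'
      · simp only [pvMatchA, pvMatchB, hc', if_true]
        by_cases hd : d - 1 = 0
        · simp [hd]
        · simp only [hd, if_false, ih]
          cases pvMatchB rest (d - 1) <;> simp <;> omega
      · simp only [pvMatchA, pvMatchB, hc, hc', if_false, ih]
        cases pvMatchB rest d <;> simp <;> omega

-- decompose a string at its first opening parenthesis (position given by Python's find)
theorem find_paren_decomp (s : List Char) (h : PySem.Chars.isIn ['('] s = true) :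
    ∃ k : Nat, PySem.Chars.find s ['('] = (k : Int) ∧ '(' ∉ s.take k ∧
      s.drop k = '(' :: s.drop (k + 1) := by
  have hinf : ['('] <:+: s := (PySem.Chars.isIn_iff_infix _ _).mp h
  have hnn : 0 ≤ PySem.Chars.find s ['('] := (PySem.Chars.find_nonneg_iff _ _).mpr hinf
  obtain ⟨hpre, hmin⟩ := PySem.Chars.find_spec hnn
  refine ⟨(PySem.Chars.find s ['(']).toNat, (Int.toNat_of_nonneg hnn).symm, ?_, ?_⟩
  · intro hmem
    obtain ⟨n, hn, hget⟩ := List.getElem_of_mem hmem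
    have hlt : n < (PySem.Chars.find s ['(']).toNat := lt_of_lt_of_le hn (by
      simpa using (List.length_take ..).le.trans (min_le_left _ _))
    have hn' : n < s.length := lt_of_lt_of_le hn (by simp [List.length_take])
    exact hmin n hlt (by
      rw [List.drop_eq_getElem_cons hn']
      exact ⟨s.drop (n + 1), by simp [List.getElem_take] at hget; simp [hget]⟩)
  · set k := (PySem.Chars.find s ['(']).toNat with hk
    obtain ⟨t, ht⟩ := hpre
    have hk' : k < s.length := by
      by_contra hge
      have : s.drop k = [] := List.drop_eq_nil_of_le (le_of_not_gt hge)
      rw [this] at ht; exact absurd ht.symm (by simp)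
    rw [List.drop_eq_getElem_cons hk'] at ht ⊢
    simp only [List.singleton_append] at ht
    have : s[k] = '(' := by
      have := List.cons.inj ht
      exact this.1.symm
    simp [this]

-- B's pass at an opening parenthesis with budget left
theorem pvPassB_open (b : Nat) (rest : List Char) :
    pvPassB (b + 1) ('(' :: rest) =
      match pvMatchB ('(' :: rest) 0 with
      | none => '(' :: rest
      | some e =>
        if PySem.Chars.isIn "regulation".toList
            (PySem.Chars.lower (('(' :: rest).take (e + 1))) then
          pvPassB b (('(' :: rest).drop (e + 1))
        else '(' :: rest := by
  rw [pvPassB, if_pos (show ('(' : Char) = '(' ∧ 0 < b + 1 from ⟨rfl, Nat.succ_pos b⟩)]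
  simp only [Nat.add_sub_cancel]

-- the main correspondence: A's bounded while-loop equals B's one-pass scan
theorem loop_eq_pass (n : Nat) (s : List Char) (hn : s.length ≤ n) (f : Nat) :
    pvLoopA f s = pvPassB f s := by
  induction n generalizing s f with
  | zero =>
    have : s = [] := List.eq_nil_of_length_eq_zero (Nat.le_zero.mp hn)
    subst this
    cases f with
    | zero => simp [pvLoopA, pvPassB_nil]
    | succ f => rw [pvLoopA, if_neg (by decide), pvPassB_nil]
  | succ n ih =>
    cases f with
    | zero => simp [pvLoopA, pvPassB_zero]
    | succ f =>
      by_cases h : PySem.Chars.isIn ['('] s = true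
      · obtain ⟨k, hfind, hfree, hdrop⟩ := find_paren_decomp s h
        have hs_split : s = s.take k ++ '(' :: s.drop (k + 1) := by
          conv_lhs => rw [← List.take_append_drop k s]
          rw [hdrop]
        have hklen : k < s.length := by
          by_contra hge
          rw [List.drop_eq_nil_of_le (le_of_not_gt hge)] at hdrop
          exact absurd hdrop.symm (by simp)
        have htake : (s.take k).length = k := List.length_take_of_le hklen.le
        rw [pvLoopA, if_pos h, hfind, if_neg (show ¬((k : Int) = -1) by omega),
          Int.toNat_natCast, pvMatch_agree, hdrop]
        have hpass : pvPassB (f + 1) s = s.take k ++ pvPassB (f + 1) ('(' :: s.drop (k + 1)) := by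
          conv_lhs => rw [hs_split]
          exact pvPassB_append_free _ hfree _ _
        rw [hpass, pvPassB_open]
        cases hm : pvMatchB ('(' :: s.drop (k + 1)) 0 with
        | none =>
          simp only [Option.elim, if_true]
          rw [← hdrop, List.take_append_drop]
        | some e =>
          simp only [Option.elim]
          have hne : ¬((k : Int) + (e : Int) = -1) := by omega
          rw [if_neg hne]
          have hsec : PySem.List.slice s (some (k : Int)) (some ((k : Int) + (e : Int) + 1)) =
              ('(' :: s.drop (k + 1)).take (e + 1) := by
            have h1 : (k : Int) + (e : Int) + 1 = ((k + e + 1 : Nat) : Int) := by push_cast; ring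
            rw [h1, PySem.List.slice_natCast, ← hdrop]
            congr 1
            omega
          rw [hsec]
          by_cases hreg : PySem.Chars.isIn "regulation".toList
              (PySem.Chars.lower (('(' :: s.drop (k + 1)).take (e + 1))) = true
          · rw [if_pos hreg, if_pos hreg]
            have hsl1 : PySem.List.slice s none (some (k : Int)) = s.take k :=
              PySem.List.slice_to s (by omega)
            have hsl2 : PySem.List.slice s (some ((k : Int) + (e : Int) + 1)) none =
                ('(' :: s.drop (k + 1)).drop (e + 1) := by
              have h1 : (k : Int) + (e : Int) + 1 = ((k + e + 1 : Nat) : Int) := by push_cast; ring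
              rw [h1, PySem.List.slice_from s (by omega), Int.toNat_natCast, ← hdrop,
                List.drop_drop]
              congr 1
            rw [hsl1, hsl2]
            have hlen : (s.take k ++ ('(' :: s.drop (k + 1)).drop (e + 1)).length ≤ n := by
              simp only [List.length_append, List.length_drop, List.length_cons, htake]
              omega
            rw [ih _ hlen, pvPassB_append_free _ hfree]
          · rw [if_neg hreg, if_neg hreg, ← hs_split]
      · rw [pvLoopA, if_neg h, pvPassB_no_paren s
          (fun hmem => h ((PySem.Chars.isIn_iff_infix _ _).mpr
            ((List.singleton_infix_iff _ _).mpr hmem)))]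

-- ===== VERDICT (by name: the statement is the Claim_ definition above) =====
theorem summarize_requirement_py_spec : Claim_equal_summarize_requirement_py := by
  intro requirement _
  unfold Spec_summarize_requirement_py summarize_requirement_py summarize_requirement_py_alt
  rw [loop_eq_pass requirement.toList.length requirement.toList le_rfl]
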